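-- pv_equiv track=rewrite | github.com/FRzepka/1_SCRIPTS | Arduino/LFP_SOC_SOH/BMS_Arduino_ready/Arduino_MCU_Check/hardware_validation_comparison.py | estimate_model_parameters
-- ===== SOURCE A (Python) =====
-- def estimate_model_parameters(input_size, hidden_size, num_layers):
--     """Schätzt Anzahl der Modell-Parameter"""
--     # LSTM Parameters
--     lstm_params = 0
--     for layer in range(num_layers):
--         if layer == 0:
--             # Erste Schicht: input_size -> hidden_size
--             lstm_params += 4 * (input_size * hidden_size + hidden_size * hidden_size + 2 * hidden_size)
--         else:
--             # Weitere Schichten: hidden_size -> hidden_size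
--             lstm_params += 4 * (hidden_size * hidden_size + hidden_size * hidden_size + 2 * hidden_size)
--
--     # MLP Parameters (32->32->32->1)
--     mlp_params = (hidden_size * 32 + 32) + (32 * 32 + 32) + (32 * 1 + 1)
--
--     total_params = lstm_params + mlp_params
--     return total_params
-- ===== SOURCE B (Python) =====
-- def estimate_model_parameters(input_size, hidden_size, num_layers):
--     """Closed-form estimate of LSTM+MLP parameter count (no loop)."""
--     mlp_params = (hidden_size * 32 + 32) + (32 * 32 + 32) + (32 * 1 + 1)
--     if num_layers <= 0:
--         return mlp_params
--     first = 4 * (input_size * hidden_size + hidden_size * hidden_size + 2 * hidden_size)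
--     per_layer = 4 * (2 * hidden_size * hidden_size + 2 * hidden_size)
--     return first + (num_layers - 1) * per_layer + mlp_params
-- ===== Notes on version B (the rewrite author's own statement) =====
-- stated objective: faster
-- what changed: Replaced the per-layer loop with a closed-form formula: first-layer term plus (num_layers-1) times the constant per-layer term.
import Mathlib
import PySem

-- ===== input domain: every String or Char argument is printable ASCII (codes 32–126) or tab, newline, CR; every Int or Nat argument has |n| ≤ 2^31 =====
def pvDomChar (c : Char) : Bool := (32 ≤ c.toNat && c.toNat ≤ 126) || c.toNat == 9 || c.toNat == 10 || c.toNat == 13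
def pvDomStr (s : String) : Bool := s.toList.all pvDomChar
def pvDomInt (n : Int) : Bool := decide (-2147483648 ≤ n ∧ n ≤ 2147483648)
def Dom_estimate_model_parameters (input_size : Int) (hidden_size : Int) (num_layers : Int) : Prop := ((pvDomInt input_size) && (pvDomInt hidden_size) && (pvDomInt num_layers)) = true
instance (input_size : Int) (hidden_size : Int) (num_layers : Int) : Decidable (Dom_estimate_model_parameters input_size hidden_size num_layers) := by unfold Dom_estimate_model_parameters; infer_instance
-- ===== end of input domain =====

-- ===== PORT A =====
-- B replaces A's per-layer loop by a closed-form formula (objective: faster).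
def estimate_model_parameters (input_size : Int) (hidden_size : Int) (num_layers : Int) : Int :=
  let lstm_params :=
    (PySem.List.pyRange 0 num_layers 1).foldl
      (fun acc layer =>
        if layer == 0 then
          acc + 4 * (input_size * hidden_size + hidden_size * hidden_size + 2 * hidden_size)
        else
          acc + 4 * (hidden_size * hidden_size + hidden_size * hidden_size + 2 * hidden_size)) 0
  let mlp_params := (hidden_size * 32 + 32) + (32 * 32 + 32) + (32 * 1 + 1)
  lstm_params + mlp_params

-- ===== PORT B =====
def estimate_model_parameters_alt (input_size : Int) (hidden_size : Int) (num_layers : Int) : Int :=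
  let mlp_params := (hidden_size * 32 + 32) + (32 * 32 + 32) + (32 * 1 + 1)
  if num_layers ≤ 0 then mlp_params
  else
    let first := 4 * (input_size * hidden_size + hidden_size * hidden_size + 2 * hidden_size)
    let per_layer := 4 * (2 * hidden_size * hidden_size + 2 * hidden_size)
    first + (num_layers - 1) * per_layer + mlp_params

-- ===== PRECONDITION & SPEC =====
def Spec_estimate_model_parameters (input_size : Int) (hidden_size : Int) (num_layers : Int) (out : Int) : Prop := out = estimate_model_parameters_alt input_size hidden_size num_layers
instance (input_size : Int) (hidden_size : Int) (num_layers : Int) (out : Int) : Decidable (Spec_estimate_model_parameters input_size hidden_size num_layers out) := by unfold Spec_estimate_model_parameters; infer_instance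

-- ===== CLAIM (what is proved, stated in full; the proofs are below) =====
def Claim_equal_estimate_model_parameters : Prop := ∀ (input_size : Int) (hidden_size : Int) (num_layers : Int), Dom_estimate_model_parameters input_size hidden_size num_layers → Spec_estimate_model_parameters input_size hidden_size num_layers (estimate_model_parameters input_size hidden_size num_layers)

-- ===== LEMMAS AND PROOFS =====

-- ===== VERDICT (by name: the statement is the Claim_ definition above) =====
lemma pv_foldl_range (a b : Int) : ∀ (m : Nat),
    ((List.range m).map (fun k : Nat => (0 : Int) + (k : Int))).foldl
      (fun acc layer => if layer == 0 then acc + a else acc + b) 0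
    = if m = 0 then 0 else a + ((m : Int) - 1) * b := by
  intro m
  induction m with
  | zero => simp
  | succ k ih =>
    rw [List.range_succ, List.map_append, List.foldl_append, ih]
    cases k with
    | zero => simp
    | succ j =>
      have hj : ((0:Int) + (j+1 : Nat)) ≠ 0 := by push_cast; omega
      simp only [List.map_cons, List.map_nil, List.foldl_cons, List.foldl_nil,
        beq_iff_eq, hj, Nat.succ_ne_zero, if_false]
      push_cast
      ring

theorem estimate_model_parameters_spec : Claim_equal_estimate_model_parameters := by
  intro i h n _
  unfold Spec_estimate_model_parameters estimate_model_parameters estimate_model_parameters_alt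
  simp only [PySem.List.pyRange_one, Int.sub_zero]
  rw [pv_foldl_range]
  by_cases hn : n ≤ 0
  · have : n.toNat = 0 := by omega
    simp [this, hn]
  · have h0 : n.toNat ≠ 0 := by omega
    have hc : ((n.toNat : Int)) = n := by omega
    simp only [h0, hn, hc, if_false]
    ring
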